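-- pv_equiv track=rewrite | github.com/vedaankb/NutritionEstimationModel_CulinAi | nutrition_engine/layers/layer2/layer2/ontology.py | infer_oil_intensity
-- ===== SOURCE A (Python) =====
-- def infer_oil_intensity(cooking_methods: list, cuisine: str) -> str:
--     """Infer oil intensity from cooking methods and cuisine."""
--     if not cooking_methods:
--         return "medium"
--
--     methods_lower = [m.lower() for m in cooking_methods]
--
--     # High oil intensity
--     if any(m in ["deep_fried", "fried"] for m in methods_lower):
--         return "high"
--
--     # Medium oil intensity
--     if any(m in ["sauteed", "roasted", "baked"] for m in methods_lower):
--         return "medium"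
--
--     # Low oil intensity
--     if any(m in ["steamed", "raw", "grilled"] for m in methods_lower):
--         return "low"
--
--     return "medium"
-- ===== SOURCE B (Python) =====
-- _PRIORITY = {
--     "deep_fried": 3, "fried": 3,
--     "sauteed": 2, "roasted": 2, "baked": 2,
--     "steamed": 1, "raw": 1, "grilled": 1,
-- }
-- _LABEL = {3: "high", 2: "medium", 1: "low", 0: "medium"}
--
--
-- def infer_oil_intensity(cooking_methods: list, cuisine: str) -> str:
--     """Infer oil intensity from cooking methods and cuisine."""
--     if not cooking_methods:
--         return "medium"
--     best = 0
--     for m in cooking_methods: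
--         best = max(best, _PRIORITY.get(m.lower(), 0))
--     return _LABEL[best]
-- ===== Notes on version B (the rewrite author's own statement) =====
-- stated objective: simpler
-- what changed: Replaces the three separate any-over-hardcoded-lists scans with one dict of per-method priority scores, a single max-fold over the methods, and a final priority-to-label lookup (unknown methods score 0, which labels as medium).
import Mathlib
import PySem

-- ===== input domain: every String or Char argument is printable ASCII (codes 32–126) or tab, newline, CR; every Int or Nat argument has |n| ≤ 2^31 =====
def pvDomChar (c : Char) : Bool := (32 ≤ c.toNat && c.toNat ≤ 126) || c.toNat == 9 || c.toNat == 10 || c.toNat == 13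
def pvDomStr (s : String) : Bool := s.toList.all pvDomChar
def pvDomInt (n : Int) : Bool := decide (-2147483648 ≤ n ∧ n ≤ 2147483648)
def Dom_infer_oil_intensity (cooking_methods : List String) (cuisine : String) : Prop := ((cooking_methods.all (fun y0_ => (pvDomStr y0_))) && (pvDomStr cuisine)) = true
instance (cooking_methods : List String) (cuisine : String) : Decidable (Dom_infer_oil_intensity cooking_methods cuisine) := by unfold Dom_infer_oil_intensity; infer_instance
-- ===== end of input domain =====

-- ===== PORT A =====
-- B replaces A's three hard-coded any-scans by one method->priority dict, a single
-- max-fold over the methods and a final priority->label lookup (objective: simpler).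
def infer_oil_intensity (cooking_methods : List String) (cuisine : String) : String :=
  if cooking_methods = [] then "medium"
  else
    let methods_lower := cooking_methods.map PySem.Str.lower
    if methods_lower.any (fun m => m == "deep_fried" || m == "fried") then "high"
    else if methods_lower.any (fun m => m == "sauteed" || m == "roasted" || m == "baked") then "medium"
    else if methods_lower.any (fun m => m == "steamed" || m == "raw" || m == "grilled") then "low"
    else "medium"

-- ===== PORT B =====
def pvPriority : PySem.Dict String Int :=
  PySem.Dict.ofList [("deep_fried", 3), ("fried", 3), ("sauteed", 2), ("roasted", 2),
    ("baked", 2), ("steamed", 1), ("raw", 1), ("grilled", 1)]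

def pvLabel : PySem.Dict Int String :=
  PySem.Dict.ofList [(3, "high"), (2, "medium"), (1, "low"), (0, "medium")]

def infer_oil_intensity_alt (cooking_methods : List String) (cuisine : String) : String :=
  if cooking_methods = [] then "medium"
  else
    let best := cooking_methods.foldl
      (fun b m => max b (pvPriority.getD (PySem.Str.lower m) 0)) 0
    -- Python's `_LABEL[best]` would raise on a missing key; `best` is always a key
    -- (0..3), so the `.getD` default is never used — it only makes the lookup total.
    (pvLabel.get? best).getD "medium"

-- ===== PRECONDITION & SPEC =====
def Spec_infer_oil_intensity (cooking_methods : List String) (cuisine : String) (out : String) : Prop := out = infer_oil_intensity_alt cooking_methods cuisine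
instance (cooking_methods : List String) (cuisine : String) (out : String) : Decidable (Spec_infer_oil_intensity cooking_methods cuisine out) := by unfold Spec_infer_oil_intensity; infer_instance

-- ===== CLAIM (what is proved, stated in full; the proofs are below) =====
def Claim_equal_infer_oil_intensity : Prop := ∀ (cooking_methods : List String) (cuisine : String), Dom_infer_oil_intensity cooking_methods cuisine → Spec_infer_oil_intensity cooking_methods cuisine (infer_oil_intensity cooking_methods cuisine)

-- ===== LEMMAS AND PROOFS =====

def prio (m : String) : Int := pvPriority.getD m 0

def Ffold (ls : List String) (p : Int) : Int :=
  ls.foldl (fun b m => max b (prio m)) p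

lemma prio_eq (m : String) :
    prio m =
      if m = "deep_fried" then 3 else if m = "fried" then 3
      else if m = "sauteed" then 2 else if m = "roasted" then 2 else if m = "baked" then 2
      else if m = "steamed" then 1 else if m = "raw" then 1 else if m = "grilled" then 1
      else 0 := by
  have hmk : pvPriority = PySem.Dict.mk [("deep_fried", 3), ("fried", 3), ("sauteed", 2),
      ("roasted", 2), ("baked", 2), ("steamed", 1), ("raw", 1), ("grilled", 1)] := by decide
  rw [prio, hmk]
  by_cases h1 : m = "deep_fried"
  · subst h1; decide
  by_cases h2 : m = "fried"
  · subst h2; decide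
  by_cases h3 : m = "sauteed"
  · subst h3; decide
  by_cases h4 : m = "roasted"
  · subst h4; decide
  by_cases h5 : m = "baked"
  · subst h5; decide
  by_cases h6 : m = "steamed"
  · subst h6; decide
  by_cases h7 : m = "raw"
  · subst h7; decide
  by_cases h8 : m = "grilled"
  · subst h8; decide
  simp only [PySem.Dict.getD_eq_get?_getD, PySem.Dict.get?_mk_cons, beq_iff_eq,
    if_neg (Ne.symm h1), if_neg (Ne.symm h2), if_neg (Ne.symm h3), if_neg (Ne.symm h4),
    if_neg (Ne.symm h5), if_neg (Ne.symm h6), if_neg (Ne.symm h7), if_neg (Ne.symm h8),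
    if_neg h1, if_neg h2, if_neg h3, if_neg h4, if_neg h5, if_neg h6, if_neg h7, if_neg h8]
  simp [PySem.Dict.get?]

lemma prio_le_three (m : String) : prio m ≤ 3 := by
  rw [prio_eq]; split_ifs <;> norm_num

lemma le_Ffold : ∀ (ls : List String) (p : Int), p ≤ Ffold ls p := by
  intro ls
  induction ls with
  | nil => intro p; simp [Ffold]
  | cons a ls ih =>
      intro p
      calc p ≤ max p (prio a) := le_max_left _ _
        _ ≤ Ffold ls (max p (prio a)) := ih _
        _ = Ffold (a :: ls) p := rfl

lemma mem_le_Ffold : ∀ (ls : List String) (p : Int) (m : String), m ∈ ls → prio m ≤ Ffold ls p := by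
  intro ls
  induction ls with
  | nil => intro p m h; cases h
  | cons a ls ih =>
      intro p m h
      rcases List.mem_cons.mp h with h | h
      · subst h
        calc prio m ≤ max p (prio m) := le_max_right _ _
          _ ≤ Ffold ls (max p (prio m)) := le_Ffold _ _
          _ = Ffold (m :: ls) p := rfl
      · exact ih (max p (prio a)) m h

lemma Ffold_le : ∀ (ls : List String) (p c : Int), p ≤ c → (∀ m ∈ ls, prio m ≤ c) → Ffold ls p ≤ c := by
  intro ls
  induction ls with
  | nil => intro p c hp _; simpa [Ffold] using hp
  | cons a ls ih =>
      intro p c hp hm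
      have ha : prio a ≤ c := hm a (List.mem_cons_self ..)
      exact ih (max p (prio a)) c (max_le hp ha) (fun m hmem => hm m (List.mem_cons_of_mem _ hmem))

lemma alt_fold_eq (cm : List String) :
    cm.foldl (fun b m => max b (pvPriority.getD (PySem.Str.lower m) 0)) 0
      = Ffold (cm.map PySem.Str.lower) 0 := by
  simp [Ffold, List.foldl_map, prio]

-- ===== VERDICT (by name: the statement is the Claim_ definition above) =====
theorem infer_oil_intensity_spec : Claim_equal_infer_oil_intensity := by
  unfold Claim_equal_infer_oil_intensity Spec_infer_oil_intensity
  intro cm cu _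
  unfold infer_oil_intensity infer_oil_intensity_alt
  by_cases hnil : cm = []
  · simp [hnil]
  · simp only [hnil, if_false]
    rw [alt_fold_eq]
    set ls := cm.map PySem.Str.lower with hls
    by_cases h3 : ls.any (fun m => m == "deep_fried" || m == "fried") = true
    · rcases List.any_eq_true.mp h3 with ⟨m, hm, hpm⟩
      simp only [Bool.or_eq_true, beq_iff_eq] at hpm
      have hp3 : prio m = 3 := by
        rw [prio_eq]; rcases hpm with h | h <;> simp [h]
      have hub : Ffold ls 0 ≤ 3 :=
        Ffold_le ls 0 3 (by norm_num) (fun m _ => prio_le_three m)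
      have hF : Ffold ls 0 = 3 := le_antisymm hub (hp3 ▸ mem_le_Ffold ls 0 m hm)
      rw [if_pos h3, hF]
      decide
    · have hle2 : ∀ m ∈ ls, prio m ≤ 2 := by
        intro m hm
        have hnp : ¬ ((m == "deep_fried" || m == "fried") = true) := by
          intro hc; exact h3 (List.any_eq_true.mpr ⟨m, hm, hc⟩)
        simp only [Bool.or_eq_true, beq_iff_eq, not_or] at hnp
        rw [prio_eq]
        split_ifs <;> first | omega | simp_all
      rw [if_neg h3]
      by_cases h2 : ls.any (fun m => m == "sauteed" || m == "roasted" || m == "baked") = true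
      · rcases List.any_eq_true.mp h2 with ⟨m, hm, hpm⟩
        simp only [Bool.or_eq_true, beq_iff_eq] at hpm
        have hnp : ¬ ((m == "deep_fried" || m == "fried") = true) := by
          intro hc; exact h3 (List.any_eq_true.mpr ⟨m, hm, hc⟩)
        simp only [Bool.or_eq_true, beq_iff_eq, not_or] at hnp
        have hp2 : prio m = 2 := by
          rw [prio_eq]
          rcases hpm with (h | h) | h <;> simp_all
        have hub : Ffold ls 0 ≤ 2 := Ffold_le ls 0 2 (by norm_num) hle2
        have hF : Ffold ls 0 = 2 := le_antisymm hub (hp2 ▸ mem_le_Ffold ls 0 m hm)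
        rw [if_pos h2, hF]
        decide
      · have hle1 : ∀ m ∈ ls, prio m ≤ 1 := by
          intro m hm
          have hnp2 : ¬ ((m == "sauteed" || m == "roasted" || m == "baked") = true) := by
            intro hc; exact h2 (List.any_eq_true.mpr ⟨m, hm, hc⟩)
          simp only [Bool.or_eq_true, beq_iff_eq, not_or] at hnp2
          have h := hle2 m hm
          rw [prio_eq] at h ⊢
          split_ifs at h ⊢ <;> first | omega | simp_all
        rw [if_neg h2]
        by_cases h1 : ls.any (fun m => m == "steamed" || m == "raw" || m == "grilled") = true
        · rcases List.any_eq_true.mp h1 with ⟨m, hm, hpm⟩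
          simp only [Bool.or_eq_true, beq_iff_eq] at hpm
          have hnp2 : ¬ ((m == "sauteed" || m == "roasted" || m == "baked") = true) := by
            intro hc; exact h2 (List.any_eq_true.mpr ⟨m, hm, hc⟩)
          have hnp3 : ¬ ((m == "deep_fried" || m == "fried") = true) := by
            intro hc; exact h3 (List.any_eq_true.mpr ⟨m, hm, hc⟩)
          simp only [Bool.or_eq_true, beq_iff_eq, not_or] at hnp2 hnp3
          have hp1 : prio m = 1 := by
            rw [prio_eq]
            rcases hpm with (h | h) | h <;> simp_all
          have hub : Ffold ls 0 ≤ 1 := Ffold_le ls 0 1 (by norm_num) hle1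
          have hF : Ffold ls 0 = 1 := le_antisymm hub (hp1 ▸ mem_le_Ffold ls 0 m hm)
          rw [if_pos h1, hF]
          decide
        · have hle0 : ∀ m ∈ ls, prio m ≤ 0 := by
            intro m hm
            have hnp1 : ¬ ((m == "steamed" || m == "raw" || m == "grilled") = true) := by
              intro hc; exact h1 (List.any_eq_true.mpr ⟨m, hm, hc⟩)
            have hnp2 : ¬ ((m == "sauteed" || m == "roasted" || m == "baked") = true) := by
              intro hc; exact h2 (List.any_eq_true.mpr ⟨m, hm, hc⟩)
            have hnp3 : ¬ ((m == "deep_fried" || m == "fried") = true) := by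
              intro hc; exact h3 (List.any_eq_true.mpr ⟨m, hm, hc⟩)
            simp only [Bool.or_eq_true, beq_iff_eq, not_or] at hnp1 hnp2 hnp3
            rw [prio_eq]
            split_ifs <;> first | omega | (exfalso; tauto)
          have hF : Ffold ls 0 = 0 := le_antisymm (Ffold_le ls 0 0 le_rfl hle0) (le_Ffold ls 0)
          rw [if_neg h1, hF]
          decide
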